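-- pv_equiv track=rewrite | github.com/neerajsinghjr/dsa | neetcode/neetcode_all/01. array_and_hashing/e035_2202_divide_array_to_equal_pairs.py | _ansv3
-- ===== SOURCE A (Python) =====
-- from typing import List
--
-- def _ansv3(nums: List[int], n: int) -> bool:
--     """
--     _run: accpeted
--     _code: tc: o(n), sc: o(n), rt: 2 ms, tcz: 137/137
--     _choke: none
--     _brief: --- basis of my ansv0() ---
--     - under the hood logic here is that if we have 2*n nums and we are expecting n pair of
--     duplet; then there would be tight n couples available which there is any mismatch then
--     its impossible to create n pairs of duplet
--     - created a hashmap with nums counts; later we iterate over the hashmap and validate if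
--     there is any value count which map to a key which count is odd in number; than our ans is
--     False othewise it is True
--     """
--     counters = {}
--     for num in nums:
--         counters[num] = counters.get(num, 0) + 1
--     for key, val in counters.items():
--         if val%2 != 0:
--             return False
--     return True
-- ===== SOURCE B (Python) =====
-- from typing import List
--
-- def _ansv3(nums: List[int], n: int) -> bool:
--     unpaired = set()
--     for num in nums:
--         if num in unpaired:
--             unpaired.remove(num)
--         else:
--             unpaired.add(num)
--     return len(unpaired) == 0
-- ===== Notes on version B (the rewrite author's own statement) =====
-- stated objective: simpler
-- what changed: Replaces the two-pass count-dict-then-check-parity algorithm with a single pass that toggles each value in a set of currently-unpaired values and returns whether that set ends empty.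
import Mathlib
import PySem

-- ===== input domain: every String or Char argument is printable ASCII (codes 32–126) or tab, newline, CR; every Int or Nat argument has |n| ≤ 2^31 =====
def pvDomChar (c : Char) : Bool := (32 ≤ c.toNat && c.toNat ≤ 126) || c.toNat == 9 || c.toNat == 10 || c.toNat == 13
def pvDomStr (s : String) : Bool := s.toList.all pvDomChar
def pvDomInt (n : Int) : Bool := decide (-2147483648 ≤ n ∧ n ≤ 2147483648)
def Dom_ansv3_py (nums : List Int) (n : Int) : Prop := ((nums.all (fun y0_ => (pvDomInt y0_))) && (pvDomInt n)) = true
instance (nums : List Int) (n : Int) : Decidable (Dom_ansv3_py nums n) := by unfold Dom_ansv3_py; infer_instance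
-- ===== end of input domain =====

-- B replaces A's two passes (build a count dict, then scan it for an odd count) by one pass
-- toggling each value in a set of unpaired values and testing that it ends empty; objective: simpler.


-- ===== PORT A =====
-- counters[num] = counters.get(num, 0) + 1 over nums; then the items loop with early 'return False'
-- on an odd count is the 'all' of the parity test over the items.
def ansv3_py (nums : List Int) (n : Int) : Bool :=
  let counters : PySem.Dict Int Int :=
    nums.foldl (fun d num => d.insert num (d.getD num 0 + 1)) PySem.Dict.empty
  counters.items.all (fun kv => PySem.Int.mod kv.2 2 == 0)

-- ===== PORT B =====
-- single pass: toggle num in the set of unpaired values; answer = len(unpaired) == 0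
def ansv3_py_alt (nums : List Int) (n : Int) : Bool :=
  let unpaired : PySem.Set Int :=
    nums.foldl
      (fun s num => if PySem.Set.contains s num then PySem.Set.discard s num else PySem.Set.add s num)
      PySem.Set.empty
  PySem.Set.len unpaired == 0

-- ===== PRECONDITION & SPEC =====
def Spec_ansv3_py (nums : List Int) (n : Int) (out : Bool) : Prop := out = ansv3_py_alt nums n
instance (nums : List Int) (n : Int) (out : Bool) : Decidable (Spec_ansv3_py nums n out) := by unfold Spec_ansv3_py; infer_instance

-- ===== CLAIM (what is proved, stated in full; the proofs are below) =====
def Claim_equal_ansv3_py : Prop := ∀ (nums : List Int) (n : Int), Dom_ansv3_py nums n → Spec_ansv3_py nums n (ansv3_py nums n)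

-- ===== LEMMAS AND PROOFS =====

-- A returns true iff every value occurs an even number of times.
theorem ansv3_py_iff (nums : List Int) (n : Int) :
    ansv3_py nums n = true ↔ ∀ x ∈ nums, nums.count x % 2 = 0 := by
  show ((nums.foldl (fun d num => d.insert num (d.getD num 0 + 1)) PySem.Dict.empty).items.all
    (fun kv => PySem.Int.mod kv.2 2 == 0)) = true ↔ _
  rw [PySem.Dict.foldl_insert_getD_add_one_eq_counter, PySem.Dict.items_counter]
  simp only [List.all_eq_true, List.mem_map, forall_exists_index]
  constructor
  · intro h x hx
    have := h (x, (nums.count x : Int)) x ⟨(PySem.Set.mem_ofList nums x).2 hx, rfl⟩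
    simp only [beq_iff_eq] at this
    have h2 := (PySem.Int.mod_eq_zero_iff_dvd _ 2).1 this
    omega
  · rintro h kv x ⟨hx, rfl⟩
    have := h x ((PySem.Set.mem_ofList nums x).1 hx)
    simp only [beq_iff_eq]
    rw [PySem.Int.mod_eq_zero_iff_dvd]
    omega

def pvToggle (s : PySem.Set Int) (num : Int) : PySem.Set Int :=
  if PySem.Set.contains s num then PySem.Set.discard s num else PySem.Set.add s num

theorem nodup_pvToggle (s : PySem.Set Int) (h : s.Nodup) (num : Int) : (pvToggle s num).Nodup := by
  unfold pvToggle
  split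
  · exact PySem.Set.nodup_discard s num h
  · exact PySem.Set.nodup_add s num h

-- invariant: x is in the toggled set iff its membership parity flipped an odd number of times
theorem mem_foldl_pvToggle (l : List Int) (s : PySem.Set Int) (hs : s.Nodup) (x : Int) :
    x ∈ l.foldl pvToggle s ↔ ((x ∈ s) ↔ l.count x % 2 = 0) := by
  induction l generalizing s with
  | nil => simp
  | cons a t ih =>
    rw [List.foldl_cons, ih _ (nodup_pvToggle s hs a)]
    by_cases hax : x = a
    · subst hax
      rw [List.count_cons_self]
      by_cases hmem : x ∈ s
      · have ht : pvToggle s x = PySem.Set.discard s x := by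
          unfold pvToggle; rw [if_pos ((PySem.Set.contains_iff s x).2 hmem)]
        rw [ht]
        simp only [PySem.Set.mem_discard, ne_eq, not_true_eq_false, and_false, false_iff,
          hmem, true_iff]
        omega
      · have ht : pvToggle s x = PySem.Set.add s x := by
          unfold pvToggle
          rw [if_neg (fun hc => hmem ((PySem.Set.contains_iff s x).1 hc))]
        rw [ht]
        simp only [PySem.Set.mem_add, or_true, true_iff, hmem, false_iff]
        omega
    · have ht : (x ∈ pvToggle s a) ↔ x ∈ s := by
        unfold pvToggle
        split <;> simp [PySem.Set.mem_discard, PySem.Set.mem_add, hax]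
      rw [List.count_cons_of_ne (fun h => hax h.symm)]
      exact iff_congr ht Iff.rfl

-- B returns true iff every value occurs an even number of times.
theorem ansv3_py_alt_iff (nums : List Int) (n : Int) :
    ansv3_py_alt nums n = true ↔ ∀ x ∈ nums, nums.count x % 2 = 0 := by
  unfold ansv3_py_alt
  have hfold : (nums.foldl
      (fun s num => if PySem.Set.contains s num then PySem.Set.discard s num else PySem.Set.add s num)
      PySem.Set.empty) = nums.foldl pvToggle PySem.Set.empty := rfl
  rw [hfold]
  simp only [PySem.Set.len, Nat.cast_eq_zero, beq_iff_eq,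
    List.length_eq_zero_iff, List.eq_nil_iff_forall_not_mem]
  constructor
  · intro h x hx
    have := h x
    rw [mem_foldl_pvToggle nums PySem.Set.empty (by simp [PySem.Set.empty]) x] at this
    simp only [PySem.Set.empty, List.not_mem_nil, false_iff] at this
    omega
  · intro h x
    rw [mem_foldl_pvToggle nums PySem.Set.empty (by simp [PySem.Set.empty]) x]
    simp only [PySem.Set.empty, List.not_mem_nil, false_iff]
    intro hc
    by_cases hx : x ∈ nums
    · exact absurd (h x hx) (by omega)
    · rw [List.count_eq_zero_of_not_mem hx] at hc; omega

-- ===== VERDICT (by name: the statement is the Claim_ definition above) =====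
theorem ansv3_py_spec : Claim_equal_ansv3_py := by
  intro nums n _
  unfold Spec_ansv3_py
  by_cases h : ∀ x ∈ nums, nums.count x % 2 = 0
  · rw [(ansv3_py_iff nums n).2 h, ((ansv3_py_alt_iff nums n).2 h)]
  · have h1 : ansv3_py nums n ≠ true := fun hc => h ((ansv3_py_iff nums n).1 hc)
    have h2 : ansv3_py_alt nums n ≠ true := fun hc => h ((ansv3_py_alt_iff nums n).1 hc)
    simp only [Bool.not_eq_true] at h1 h2
    rw [h1, h2]
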